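-- pv_equiv track=rewrite | github.com/katsut/madaminu | server/src/madaminu/services/map_validator.py | _are_adjacent
-- ===== SOURCE A (Python) =====
-- def _get_grid_cells(loc: dict) -> set[tuple[int, int]]:
--     """Return all grid cells occupied by a location."""
--     x = loc.get("x", 0)
--     y = loc.get("y", 0)
--     w = loc.get("w", 1)
--     h = loc.get("h", 1)
--     cells = set()
--     for dx in range(w):
--         for dy in range(h):
--             cells.add((x + dx, y + dy))
--     return cells
--
-- def _are_adjacent(loc_a: dict, loc_b: dict) -> bool:
--     """Check if two locations are adjacent on the grid (share an edge)."""
--     cells_a = _get_grid_cells(loc_a)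
--     cells_b = _get_grid_cells(loc_b)
--     for ax, ay in cells_a:
--         for dx, dy in [(0, 1), (0, -1), (1, 0), (-1, 0)]:
--             if (ax + dx, ay + dy) in cells_b:
--                 return True
--     return False
-- ===== SOURCE B (Python) =====
-- def _are_adjacent(loc_a: dict, loc_b: dict) -> bool:
--     """Interval test: a unit-step neighbour pair exists iff the rectangles
--     overlap on one axis and their ranges on the other axis meet at distance 1."""
--     ax0 = loc_a.get("x", 0)
--     ay0 = loc_a.get("y", 0)
--     ax1 = ax0 + loc_a.get("w", 1)
--     ay1 = ay0 + loc_a.get("h", 1)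
--     bx0 = loc_b.get("x", 0)
--     by0 = loc_b.get("y", 0)
--     bx1 = bx0 + loc_b.get("w", 1)
--     by1 = by0 + loc_b.get("h", 1)
--
--     def overlap(p0, p1, q0, q1):
--         return max(p0, q0) < min(p1, q1)
--
--     def step1(p0, p1, q0, q1):
--         # exists p in [p0,p1), q in [q0,q1) with |p - q| == 1
--         return overlap(p0, p1, q0 + 1, q1 + 1) or overlap(p0, p1, q0 - 1, q1 - 1)
--
--     return (overlap(ax0, ax1, bx0, bx1) and step1(ay0, ay1, by0, by1)) or \
--            (overlap(ay0, ay1, by0, by1) and step1(ax0, ax1, bx0, bx1))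
-- ===== Notes on version B (the rewrite author's own statement) =====
-- stated objective: alternative
-- what changed: Replaced materialising both cell sets and scanning every cell's four neighbours with a direct interval test on the rectangles' coordinate ranges (overlap on one axis, distance-1 touch on the other).
import Mathlib
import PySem

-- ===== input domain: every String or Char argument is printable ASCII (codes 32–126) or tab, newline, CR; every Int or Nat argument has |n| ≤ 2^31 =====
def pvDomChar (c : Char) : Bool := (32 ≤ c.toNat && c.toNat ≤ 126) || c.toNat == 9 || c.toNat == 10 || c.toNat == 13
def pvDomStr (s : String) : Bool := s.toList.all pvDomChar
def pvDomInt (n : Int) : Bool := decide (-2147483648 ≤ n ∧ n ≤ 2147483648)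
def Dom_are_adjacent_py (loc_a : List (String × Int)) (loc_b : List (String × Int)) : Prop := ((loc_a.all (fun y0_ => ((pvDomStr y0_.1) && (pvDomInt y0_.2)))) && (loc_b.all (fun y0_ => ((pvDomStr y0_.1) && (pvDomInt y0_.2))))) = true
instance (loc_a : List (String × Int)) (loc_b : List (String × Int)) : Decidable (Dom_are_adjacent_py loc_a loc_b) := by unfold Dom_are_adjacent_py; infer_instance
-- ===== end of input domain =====

-- B replaces A's cell-set materialisation and per-cell neighbour scan with a direct interval adjacency test on the coordinate ranges.


-- ===== PORT A =====
-- _get_grid_cells: nested range loops adding each occupied cell to a set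
def getGridCells (loc : PySem.Dict String Int) : PySem.Set (Int × Int) :=
  let x := loc.getD "x" 0
  let y := loc.getD "y" 0
  let w := loc.getD "w" 1
  let h := loc.getD "h" 1
  (PySem.List.pyRange 0 w 1).foldl (fun cells dx =>
    (PySem.List.pyRange 0 h 1).foldl (fun cells dy =>
      PySem.Set.add cells (x + dx, y + dy)) cells) PySem.Set.empty

def are_adjacent_py (loc_a : List (String × Int)) (loc_b : List (String × Int)) : Bool :=
  let cells_a := getGridCells (PySem.Dict.mk loc_a)
  let cells_b := getGridCells (PySem.Dict.mk loc_b)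
  -- 'for (ax, ay) in cells_a: for (dx, dy) in dirs: if … return True' — early-return loop = any
  cells_a.any (fun p =>
    [((0 : Int), (1 : Int)), (0, -1), (1, 0), (-1, 0)].any (fun d =>
      PySem.Set.contains cells_b (p.1 + d.1, p.2 + d.2)))

-- ===== PORT B =====
def pvOverlap (p0 p1 q0 q1 : Int) : Bool := max p0 q0 < min p1 q1

def pvStep1 (p0 p1 q0 q1 : Int) : Bool :=
  pvOverlap p0 p1 (q0 + 1) (q1 + 1) || pvOverlap p0 p1 (q0 - 1) (q1 - 1)

def are_adjacent_py_alt (loc_a : List (String × Int)) (loc_b : List (String × Int)) : Bool :=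
  let da := PySem.Dict.mk loc_a
  let db := PySem.Dict.mk loc_b
  let ax0 := da.getD "x" 0
  let ay0 := da.getD "y" 0
  let ax1 := ax0 + da.getD "w" 1
  let ay1 := ay0 + da.getD "h" 1
  let bx0 := db.getD "x" 0
  let by0 := db.getD "y" 0
  let bx1 := bx0 + db.getD "w" 1
  let by1 := by0 + db.getD "h" 1
  (pvOverlap ax0 ax1 bx0 bx1 && pvStep1 ay0 ay1 by0 by1) ||
  (pvOverlap ay0 ay1 by0 by1 && pvStep1 ax0 ax1 bx0 bx1)

-- ===== PRECONDITION & SPEC =====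
def Spec_are_adjacent_py (loc_a : List (String × Int)) (loc_b : List (String × Int)) (out : Bool) : Prop := out = are_adjacent_py_alt loc_a loc_b
instance (loc_a : List (String × Int)) (loc_b : List (String × Int)) (out : Bool) : Decidable (Spec_are_adjacent_py loc_a loc_b out) := by unfold Spec_are_adjacent_py; infer_instance

-- ===== CLAIM (what is proved, stated in full; the proofs are below) =====
def Claim_equal_are_adjacent_py : Prop := ∀ (loc_a : List (String × Int)) (loc_b : List (String × Int)), Dom_are_adjacent_py loc_a loc_b → Spec_are_adjacent_py loc_a loc_b (are_adjacent_py loc_a loc_b)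

-- ===== LEMMAS AND PROOFS =====

-- membership in a nested fold of Set.add
theorem mem_foldl_foldl_add {α β γ : Type} [BEq γ] [LawfulBEq γ] (l₁ : List α) (l₂ : List β)
    (f : α → β → γ) (s : PySem.Set γ) (z : γ) :
    z ∈ l₁.foldl (fun s a => l₂.foldl (fun s b => PySem.Set.add s (f a b)) s) s ↔
      z ∈ s ∨ ∃ a ∈ l₁, ∃ b ∈ l₂, z = f a b := by
  induction l₁ generalizing s with
  | nil => simp
  | cons a t ih =>
    simp only [List.foldl_cons, ih, PySem.Set.mem_foldl_add, List.mem_cons]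
    constructor
    · rintro (⟨h | ⟨b, hb, rfl⟩⟩ | ⟨a', ha', b, hb, rfl⟩)
      · exact Or.inl h
      · exact Or.inr ⟨a, Or.inl rfl, b, hb, rfl⟩
      · exact Or.inr ⟨a', Or.inr ha', b, hb, rfl⟩
    · rintro (h | ⟨a', ha' | ha', b, hb, rfl⟩)
      · exact Or.inl (Or.inl h)
      · exact Or.inl (Or.inr ⟨b, hb, by rw [ha']⟩)
      · exact Or.inr ⟨a', ha', b, hb, rfl⟩

theorem mem_getGridCells (loc : PySem.Dict String Int) (p : Int × Int) :
    p ∈ getGridCells loc ↔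
      loc.getD "x" 0 ≤ p.1 ∧ p.1 < loc.getD "x" 0 + loc.getD "w" 1 ∧
      loc.getD "y" 0 ≤ p.2 ∧ p.2 < loc.getD "y" 0 + loc.getD "h" 1 := by
  simp only [getGridCells]
  rw [mem_foldl_foldl_add]
  simp only [PySem.Set.empty, List.not_mem_nil, false_or, PySem.List.mem_pyRange_one]
  constructor
  · rintro ⟨dx, hdx, dy, hdy, rfl⟩
    exact ⟨by omega, by omega, by omega, by omega⟩
  · rintro ⟨h1, h2, h3, h4⟩
    exact ⟨p.1 - loc.getD "x" 0, by omega, p.2 - loc.getD "y" 0, by omega, by simp⟩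

-- the arithmetic core: a unit-step neighbour pair exists iff the interval formula holds
theorem core_iff (xa ya wa ha xb yb wb hb : Int) :
    (∃ p : Int × Int, (xa ≤ p.1 ∧ p.1 < xa + wa ∧ ya ≤ p.2 ∧ p.2 < ya + ha) ∧
        ∃ d ∈ [((0 : Int), (1 : Int)), (0, -1), (1, 0), (-1, 0)],
          xb ≤ p.1 + d.1 ∧ p.1 + d.1 < xb + wb ∧ yb ≤ p.2 + d.2 ∧ p.2 + d.2 < yb + hb) ↔
      ((pvOverlap xa (xa + wa) xb (xb + wb) && pvStep1 ya (ya + ha) yb (yb + hb)) ||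
       (pvOverlap ya (ya + ha) yb (yb + hb) && pvStep1 xa (xa + wa) xb (xb + wb))) = true := by
  simp only [pvOverlap, pvStep1, Bool.or_eq_true, Bool.and_eq_true, decide_eq_true_eq,
    List.mem_cons, List.not_mem_nil, or_false]
  constructor
  · rintro ⟨⟨px, py⟩, ⟨h1, h2, h3, h4⟩, ⟨dx, dy⟩, hd, h5, h6, h7, h8⟩
    simp only [Prod.mk.injEq] at hd
    rcases hd with ⟨rfl, rfl⟩ | ⟨rfl, rfl⟩ | ⟨rfl, rfl⟩ | ⟨rfl, rfl⟩
    · exact Or.inl ⟨by omega, Or.inr (by omega)⟩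
    · exact Or.inl ⟨by omega, Or.inl (by omega)⟩
    · exact Or.inr ⟨by omega, Or.inr (by omega)⟩
    · exact Or.inr ⟨by omega, Or.inl (by omega)⟩
  · rintro (⟨hx, hy | hy⟩ | ⟨hy, hx | hx⟩)
    · exact ⟨(max xa xb, max ya (yb + 1)), ⟨by omega, by omega, by omega, by omega⟩,
        (0, -1), by simp, by omega, by omega, by omega, by omega⟩
    · exact ⟨(max xa xb, max ya (yb - 1)), ⟨by omega, by omega, by omega, by omega⟩,
        (0, 1), by simp, by omega, by omega, by omega, by omega⟩
    · exact ⟨(max xa (xb + 1), max ya yb), ⟨by omega, by omega, by omega, by omega⟩,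
        (-1, 0), by simp, by omega, by omega, by omega, by omega⟩
    · exact ⟨(max xa (xb - 1), max ya yb), ⟨by omega, by omega, by omega, by omega⟩,
        (1, 0), by simp, by omega, by omega, by omega, by omega⟩

-- ===== VERDICT (by name: the statement is the Claim_ definition above) =====
theorem are_adjacent_py_spec : Claim_equal_are_adjacent_py := by
  intro loc_a loc_b _
  unfold Spec_are_adjacent_py are_adjacent_py are_adjacent_py_alt
  rw [Bool.eq_iff_iff]
  simp only [List.any_eq_true, PySem.Set.contains_iff, mem_getGridCells]
  exact core_iff _ _ _ _ _ _ _ _
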